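-- pv_equiv track=rewrite | github.com/therealrahulsahu/py_practice | c2c/goa__trip.py | cal_max_cons
-- ===== SOURCE A (Python) =====
-- def cal_max_cons(data):
--     sub = []
--     i = 0
--     try:
--         while True:
--             sub.append(data[i+1]-data[i])
--             i += 1
--     except IndexError:
--         pass
--     max_gap = 1
--     count = 1
--     for x in sub:
--         if x == 1:
--             count += 1
--             if count > max_gap:
--                 max_gap = count
--         else:
--             count = 1
--
--     return max_gap
-- ===== SOURCE B (Python) =====
-- def cal_max_cons(data):
--     # Shift by index: a run of consecutive +1 steps in data becomes a plateau
--     # of equal values in y (data[k]-k is constant on the run).  Then jump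
--     # block-by-block over y, taking the longest plateau (default 1).
--     y = [x - i for i, x in enumerate(data)]
--     n = len(y)
--     best = 1
--     i = 0
--     while i < n:
--         j = i + 1
--         while j < n and y[j] == y[i]:
--             j += 1
--         if j - i > best:
--             best = j - i
--         i = j
--     return best
-- ===== Notes on version B (the rewrite author's own statement) =====
-- stated objective: alternative
-- what changed: B replaces A's difference-list + run-counter scan by an index-shift transform (data[k]-k is constant exactly on a +1-run) followed by block-jumping nested while loops that measure the longest plateau of equal values; no diff list and no per-element run counter.
import Mathlib
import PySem

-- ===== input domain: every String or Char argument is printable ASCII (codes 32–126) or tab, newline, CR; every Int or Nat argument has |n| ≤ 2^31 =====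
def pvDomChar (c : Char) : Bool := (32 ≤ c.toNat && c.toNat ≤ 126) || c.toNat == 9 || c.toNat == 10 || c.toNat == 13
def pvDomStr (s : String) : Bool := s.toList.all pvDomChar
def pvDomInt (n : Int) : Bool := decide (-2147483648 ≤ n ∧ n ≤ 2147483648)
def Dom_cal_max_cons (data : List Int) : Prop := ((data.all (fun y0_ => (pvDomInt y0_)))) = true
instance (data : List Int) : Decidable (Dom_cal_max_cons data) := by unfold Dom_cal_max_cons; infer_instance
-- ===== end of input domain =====

-- B replaces A's difference-list + run-counter scan by an index-shift transform
-- (data[k]-k is constant exactly on a +1-run) followed by block-jumping nested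
-- while loops over the shifted list (alternative algorithm, same cost).

-- ===== PORT A =====
-- the try/while loop builds sub = [data[1]-data[0], data[2]-data[1], ...] (IndexError ends it)
def calSub : List Int → List Int
  | a :: b :: rest => (b - a) :: calSub (b :: rest)
  | _ => []

-- the for-loop over sub with state (max_gap, count)
def calFold : Int × Int → List Int → Int × Int
  | (m, c), [] => (m, c)
  | (m, c), x :: xs =>
    if x = 1 then
      let c' := c + 1
      calFold ((if c' > m then c' else m), c') xs
    else
      calFold (m, 1) xs

def cal_max_cons (data : List Int) : Int :=
  (calFold (1, 1) (calSub data)).1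

-- ===== PORT B =====
-- the comprehension [x - i for i, x in enumerate(data)]: i is the running index (exact hand port)
def calShift (i : Int) : List Int → List Int
  | [] => []
  | x :: xs => (x - i) :: calShift (i + 1) xs

-- the inner while loop: j advances while j < n and y[j] == y[i] (indices are in range under the guard)
def calInner (y : List Int) (n i j : Int) : Int :=
  if h : j < n ∧ PySem.List.pyGetD y j 0 = PySem.List.pyGetD y i 0 then
    calInner y n i (j + 1)
  else j
termination_by (n - j).toNat
decreasing_by omega

-- calInner never moves j backwards (cited by calOuter's decreasing_by)
theorem calInner_ge (y : List Int) (n i : Int) : ∀ j, j ≤ calInner y n i j := by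
  have key : ∀ (k : Nat) (j : Int), (n - j).toNat ≤ k → j ≤ calInner y n i j := by
    intro k
    induction k with
    | zero =>
      intro j hk
      rw [calInner]
      split
      · omega
      · exact le_refl j
    | succ k ih =>
      intro j hk
      rw [calInner]
      split
      · next h => exact le_trans (by omega) (ih (j + 1) (by omega))
      · exact le_refl j
  intro j; exact key (n - j).toNat j le_rfl

-- the outer while loop: i jumps to the end of the current plateau, best tracks the longest
def calOuter (y : List Int) (n i best : Int) : Int :=
  if _h : i < n then
    let j := calInner y n i (i + 1)
    calOuter y n j (if j - i > best then j - i else best)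
  else best
termination_by (n - i).toNat
decreasing_by
  have := calInner_ge y n i (i + 1)
  omega

def cal_max_cons_alt (data : List Int) : Int :=
  let y := calShift 0 data
  let n := PySem.List.len y
  calOuter y n 0 1

-- ===== PRECONDITION & SPEC =====
def Spec_cal_max_cons (data : List Int) (out : Int) : Prop := out = cal_max_cons_alt data
instance (data : List Int) (out : Int) : Decidable (Spec_cal_max_cons data out) := by unfold Spec_cal_max_cons; infer_instance

-- ===== CLAIM (what is proved, stated in full; the proofs are below) =====
def Claim_equal_cal_max_cons : Prop := ∀ (data : List Int), Dom_cal_max_cons data → Spec_cal_max_cons data (cal_max_cons data)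

-- ===== LEMMAS AND PROOFS =====

-- A's scan fused into a single pass over the original list (proof intermediary)
def calGo (prev maxg count : Int) : List Int → Int
  | [] => maxg
  | x :: rest =>
    if x - prev = 1 then
      calGo x (max maxg (count + 1)) (count + 1) rest
    else
      calGo x maxg 1 rest

-- the same pass phrased over the shifted list (equality instead of +1 step)
def calGoEq (prev maxg count : Int) : List Int → Int
  | [] => maxg
  | x :: rest =>
    if x = prev then
      calGoEq x (max maxg (count + 1)) (count + 1) rest
    else
      calGoEq x maxg 1 rest

-- structural version of B's block-jumping loops
def goBlocks (best : Int) : List Int → Int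
  | [] => best
  | v :: tl =>
    goBlocks (max best (1 + ((tl.takeWhile (fun x => x = v)).length : Int)))
      (tl.drop (tl.takeWhile (fun x => x = v)).length)
termination_by l => l.length
decreasing_by
  simp only [List.length_cons]
  have : (tl.drop (tl.takeWhile (fun x => x = v)).length).length ≤ tl.length := by
    simp [List.length_drop]
  omega

theorem calFold_sub_eq_go (l : List Int) : ∀ (a m c : Int),
    (calFold (m, c) (calSub (a :: l))).1 = calGo a m c l := by
  induction l with
  | nil => intro a m c; simp [calSub, calFold, calGo]
  | cons b rest ih =>
    intro a m c
    simp only [calSub, calFold, calGo]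
    by_cases h : b - a = 1
    · simp only [h, if_true, ih]
      rw [show (if c + 1 > m then c + 1 else m) = max m (c + 1) by split_ifs <;> omega]
    · simp only [if_neg h, ih]

theorem calGo_eq_goEq_shift (l : List Int) : ∀ (a t m c : Int),
    calGoEq (a - t) m c (calShift (t + 1) l) = calGo a m c l := by
  induction l with
  | nil => intro a t m c; simp [calShift, calGoEq, calGo]
  | cons x xs ih =>
    intro a t m c
    simp only [calShift, calGoEq, calGo]
    by_cases h : x - a = 1
    · rw [if_pos (by omega : x - (t + 1) = a - t), if_pos h]
      have := ih x (t + 1) (max m (c + 1)) (c + 1)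
      simpa using this
    · rw [if_neg (by omega : ¬ x - (t + 1) = a - t), if_neg h]
      have := ih x (t + 1) m 1
      simpa using this

theorem calGoEq_takeWhile (tl : List Int) : ∀ (v m c : Int), c ≤ m →
    calGoEq v m c tl =
      (match tl.drop (tl.takeWhile (fun x => x = v)).length with
       | [] => max m (c + ((tl.takeWhile (fun x => x = v)).length : Int))
       | x :: rest => calGoEq x (max m (c + ((tl.takeWhile (fun x => x = v)).length : Int))) 1 rest) := by
  induction tl with
  | nil => intro v m c hc; simp [calGoEq]; omega
  | cons x tl ih =>
    intro v m c hc
    by_cases h : x = v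
    · simp only [calGoEq, List.takeWhile_cons, h, decide_true, if_true,
        List.length_cons, List.drop_succ_cons]
      subst h
      rw [ih x (max m (c + 1)) (c + 1) (le_max_right _ _)]
      have harith : max (max m (c + 1)) (c + 1 + ((tl.takeWhile (fun y => y = x)).length : Int))
          = max m (c + (((tl.takeWhile (fun y => y = x)).length : Int) + 1)) := by
        omega
      cases hdr : tl.drop (tl.takeWhile (fun y => y = x)).length with
      | nil => simp only [harith]; push_cast; ring_nf
      | cons z rest => simp only [harith]; push_cast; ring_nf
    · simp only [calGoEq, List.takeWhile_cons, h, decide_false, Bool.false_eq_true,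
        if_false, List.length_nil, List.drop_zero, Nat.cast_zero, add_zero]
      rw [max_eq_left hc]

theorem calGoEq_eq_goBlocks : ∀ (k : Nat) (l : List Int), l.length ≤ k → ∀ (m : Int), 1 ≤ m →
    (match l with | [] => m | v :: tl => calGoEq v m 1 tl) = goBlocks m l := by
  intro k
  induction k with
  | zero =>
    intro l hl m hm
    match l with
    | [] => simp [goBlocks]
    | v :: tl => simp at hl
  | succ k ih =>
    intro l hl m hm
    match l with
    | [] => simp [goBlocks]
    | v :: tl =>
      show calGoEq v m 1 tl = goBlocks m (v :: tl)
      rw [calGoEq_takeWhile tl v m 1 hm, goBlocks]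
      cases hdr : tl.drop (tl.takeWhile (fun x => x = v)).length with
      | nil => simp [goBlocks]
      | cons z rest =>
        have hlen : (z :: rest).length ≤ k := by
          have h1 : (tl.drop (tl.takeWhile (fun x => x = v)).length).length ≤ tl.length := by
            simp [List.length_drop]
          rw [hdr] at h1
          simp only [List.length_cons] at hl h1 ⊢
          omega
        have := ih (z :: rest) hlen (max m (1 + ((tl.takeWhile (fun x => x = v)).length : Int)))
          (le_trans hm (le_max_left _ _))
        simpa using this

-- inner loop = takeWhile length on the suffix
theorem calInner_drop : ∀ (k : Nat) (y : List Int) (n i j : Int), n = PySem.List.len y → 0 ≤ j →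
    (n - j).toNat ≤ k →
    calInner y n i j
      = j + (((y.drop j.toNat).takeWhile (fun x => x = PySem.List.pyGetD y i 0)).length : Int) := by
  intro k
  induction k with
  | zero =>
    intro y n i j hn hj hk
    have hjn : ¬ j < n := by omega
    rw [calInner]
    rw [dif_neg (by tauto)]
    have : y.drop j.toNat = [] := by
      apply List.drop_eq_nil_of_le
      simp [PySem.List.len_eq] at hn
      omega
    simp [this]
  | succ k ih =>
    intro y n i j hn hj hk
    by_cases hjn : j < n
    · have hjl : j.toNat < y.length := by simp [PySem.List.len_eq] at hn; omega
      have hdrop : y[j.toNat] :: y.drop (j.toNat + 1) = y.drop j.toNat :=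
        List.getElem_cons_drop hjl
      have hget : PySem.List.pyGetD y j 0 = y[j.toNat] :=
        PySem.List.pyGetD_eq_getElem y 0 hj (by simp [PySem.List.len_eq] at hn ⊢; omega)
      rw [calInner]
      by_cases hv : y[j.toNat] = PySem.List.pyGetD y i 0
      · rw [dif_pos ⟨hjn, by rw [hget, hv]⟩]
        rw [ih y n i (j + 1) hn (by omega) (by omega)]
        have h1 : (j + 1).toNat = j.toNat + 1 := by omega
        rw [h1]
        rw [← hdrop]
        simp [hv]
        omega
      · rw [dif_neg (by rw [hget]; tauto)]
        rw [← hdrop]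
        simp [hv]
    · rw [calInner, dif_neg (by tauto)]
      have : y.drop j.toNat = [] := by
        apply List.drop_eq_nil_of_le
        simp [PySem.List.len_eq] at hn
        omega
      simp [this]

-- outer loop = goBlocks on the suffix
theorem calOuter_drop : ∀ (k : Nat) (y : List Int) (n i best : Int), n = PySem.List.len y →
    0 ≤ i → (n - i).toNat ≤ k →
    calOuter y n i best = goBlocks best (y.drop i.toNat) := by
  intro k
  induction k with
  | zero =>
    intro y n i best hn hi hk
    rw [calOuter, dif_neg (by omega)]
    have : y.drop i.toNat = [] := by
      apply List.drop_eq_nil_of_le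
      simp [PySem.List.len_eq] at hn
      omega
    simp [this, goBlocks]
  | succ k ih =>
    intro y n i best hn hi hk
    by_cases hin : i < n
    · have hil : i.toNat < y.length := by simp [PySem.List.len_eq] at hn; omega
      have hdrop : y[i.toNat] :: y.drop (i.toNat + 1) = y.drop i.toNat :=
        List.getElem_cons_drop hil
      have hget : PySem.List.pyGetD y i 0 = y[i.toNat] :=
        PySem.List.pyGetD_eq_getElem y 0 hi (by simp [PySem.List.len_eq] at hn ⊢; omega)
      set tl := y.drop (i.toNat + 1) with htl
      set L := (tl.takeWhile (fun x => x = y[i.toNat])).length with hL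
      have hinner : calInner y n i (i + 1) = i + 1 + (L : Int) := by
        rw [calInner_drop ((n - (i+1)).toNat) y n i (i + 1) hn (by omega) le_rfl]
        have h1 : (i + 1).toNat = i.toNat + 1 := by omega
        rw [h1, hget, ← htl, ← hL]
      rw [calOuter, dif_pos hin]
      simp only [hinner]
      have hLle : L ≤ tl.length := by
        rw [hL]; exact (List.takeWhile_sublist _).length_le
      have hmax : (if i + 1 + (L : Int) - i > best then i + 1 + (L : Int) - i else best)
          = max best (1 + (L : Int)) := by split_ifs <;> omega
      rw [hmax]
      rw [ih y n (i + 1 + (L : Int)) (max best (1 + (L : Int))) hn (by omega)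
        (by simp [PySem.List.len_eq] at hn; omega)]
      have hdd : y.drop (i + 1 + (L : Int)).toNat = tl.drop L := by
        rw [htl, List.drop_drop]
        congr 1
        omega
      rw [hdd, ← hdrop, goBlocks]
    · rw [calOuter, dif_neg (by tauto)]
      have : y.drop i.toNat = [] := by
        apply List.drop_eq_nil_of_le
        simp [PySem.List.len_eq] at hn
        omega
      simp [this, goBlocks]

-- ===== VERDICT (by name: the statement is the Claim_ definition above) =====
theorem cal_max_cons_spec : Claim_equal_cal_max_cons := by
  intro data _
  unfold Spec_cal_max_cons cal_max_cons_alt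
  simp only []
  rw [calOuter_drop ((PySem.List.len (calShift 0 data)).toNat) (calShift 0 data) _ 0 1 rfl le_rfl
    (by omega)]
  rw [show ((0 : Int)).toNat = 0 from rfl, List.drop_zero]
  rw [← calGoEq_eq_goBlocks (calShift 0 data).length (calShift 0 data) le_rfl 1 le_rfl]
  cases data with
  | nil => simp [calShift, cal_max_cons, calSub, calFold]
  | cons a rest =>
    simp only [calShift]
    rw [show (0 : Int) + 1 = 1 from rfl]
    unfold cal_max_cons
    rw [calFold_sub_eq_go]
    simpa using (calGo_eq_goEq_shift rest a 0 1 1).symm
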